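-- pv_equiv track=rewrite | github.com/gesielr/guiasMEIlast | analyze_official_example.py | calc_mod10_rl
-- ===== SOURCE A (Python) =====
-- def calc_mod10_rl(code):
--     soma = 0
--     mult = 2
--     for d in reversed(code):
--         prod = int(d) * mult
--         if prod >= 10: prod = (prod // 10) + (prod % 10)
--         soma += prod
--         mult = 1 if mult == 2 else 2
--     resto = soma % 10
--     return "0" if resto == 0 else str(10 - resto)
-- ===== SOURCE B (Python) =====
-- def _reduce(p):
--     return p - 9 if p >= 10 else p
--
-- def calc_mod10_rl(code):
--     r = code[::-1]
--     soma = sum(_reduce(2 * int(d)) for d in r[0::2]) + sum(int(d) for d in r[1::2])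
--     resto = soma % 10
--     return "0" if resto == 0 else str(10 - resto)
-- ===== Notes on version B (the rewrite author's own statement) =====
-- stated objective: alternative
-- what changed: Replaces the single alternating-multiplier loop with a reverse-then-partition scheme: the reversed string is split into the even-position slice (digits doubled and reduced) and the odd-position slice (digits kept), each summed in its own pass.
import Mathlib
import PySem

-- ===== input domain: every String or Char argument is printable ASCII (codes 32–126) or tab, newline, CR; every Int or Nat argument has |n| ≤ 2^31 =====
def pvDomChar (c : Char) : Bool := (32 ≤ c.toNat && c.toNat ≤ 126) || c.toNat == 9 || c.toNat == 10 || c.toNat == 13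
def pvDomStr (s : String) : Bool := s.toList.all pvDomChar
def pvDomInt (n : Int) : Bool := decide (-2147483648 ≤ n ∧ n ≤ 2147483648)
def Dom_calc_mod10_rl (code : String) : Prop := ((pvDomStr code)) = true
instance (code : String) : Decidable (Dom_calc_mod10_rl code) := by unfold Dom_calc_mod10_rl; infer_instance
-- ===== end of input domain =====

-- B replaces A's single alternating-multiplier loop by reversing the string and summing the two
-- alternating slices (doubled-and-reduced vs. kept) in separate passes; objective: alternative.

-- int(d) for a single digit character; exact on digit chars — Pre_ excludes every other
-- character (there Python's int(d) raises ValueError).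
def pvDigit (c : Char) : Int := (c.toNat : Int) - 48

-- ===== PORT A =====
-- loop body of A's for-statement (state = (soma, mult))
def pvStepA (st : Int × Int) (d : Char) : Int × Int :=
  let prod := pvDigit d * st.2
  let prod := if prod ≥ 10 then PySem.Int.floordiv prod 10 + PySem.Int.mod prod 10 else prod
  (st.1 + prod, if st.2 = 2 then 1 else 2)

def calc_mod10_rl (code : String) : String :=
  let st := code.toList.reverse.foldl pvStepA (0, 2)
  let resto := PySem.Int.mod st.1 10
  if resto = 0 then "0" else PySem.Int.toStr (10 - resto)

-- ===== PORT B =====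
def pvReduce (p : Int) : Int := if p ≥ 10 then p - 9 else p

-- r[0::2]: every other element starting at index 0
def everyOther : List Char → List Char
  | [] => []
  | [a] => [a]
  | a :: _ :: t => a :: everyOther t

def calc_mod10_rl_alt (code : String) : String :=
  let r := code.toList.reverse
  let soma := ((everyOther r).map (fun d => pvReduce (2 * pvDigit d))).sum
            + ((everyOther r.tail).map pvDigit).sum
  let resto := PySem.Int.mod soma 10
  if resto = 0 then "0" else PySem.Int.toStr (10 - resto)

-- ===== PRECONDITION & SPEC =====
-- Pre_ excludes any string containing a non-digit character: there A's int(d) raises ValueError.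
def Pre_calc_mod10_rl (code : String) : Prop := code.toList.all Char.isDigit = true
instance (code : String) : Decidable (Pre_calc_mod10_rl code) := by unfold Pre_calc_mod10_rl; infer_instance
def pvWitness_calc_mod10_rl : String := "7987"

def Spec_calc_mod10_rl (code : String) (out : String) : Prop := out = calc_mod10_rl_alt code
instance (code : String) (out : String) : Decidable (Spec_calc_mod10_rl code out) := by unfold Spec_calc_mod10_rl; infer_instance

-- ===== CLAIM (what is proved, stated in full; the proofs are below) =====
def Claim_equal_calc_mod10_rl : Prop := ∀ (code : String), Dom_calc_mod10_rl code → Pre_calc_mod10_rl code → Spec_calc_mod10_rl code (calc_mod10_rl code)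

-- ===== LEMMAS AND PROOFS =====

theorem everyOther_cons (d : Char) (t : List Char) :
    everyOther (d :: t) = d :: everyOther t.tail := by
  cases t <;> rfl

-- per-digit: A's doubled-and-reduced value equals B's pvReduce (2*d) for a decimal digit value
theorem red_eq (d : Int) (h0 : 0 ≤ d) (h9 : d ≤ 9) :
    (if 2 * d ≥ 10 then PySem.Int.floordiv (2 * d) 10 + PySem.Int.mod (2 * d) 10 else 2 * d)
      = pvReduce (2 * d) := by
  rw [PySem.Int.floordiv_eq_ediv_of_pos (by omega), PySem.Int.mod_eq_emod_of_pos (by omega),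
      pvReduce]
  split_ifs <;> omega

theorem digit_bounds {c : Char} (h : c.isDigit = true) : 0 ≤ pvDigit c ∧ pvDigit c ≤ 9 := by
  simp [Char.isDigit, UInt32.le_iff_toNat_le] at h
  unfold pvDigit
  have e : c.toNat = c.val.toNat := rfl
  rw [e]
  omega

-- loop ↔ two-pass sums, for both phases of the alternating multiplier
theorem loop_eq (l : List Char) (hd : ∀ c ∈ l, c.isDigit = true) : ∀ s : Int,
    (l.foldl pvStepA (s, 2)).1
      = s + ((everyOther l).map (fun d => pvReduce (2 * pvDigit d))).sum
          + ((everyOther l.tail).map pvDigit).sum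
  ∧ (l.foldl pvStepA (s, 1)).1
      = s + ((everyOther l).map pvDigit).sum
          + ((everyOther l.tail).map (fun d => pvReduce (2 * pvDigit d))).sum := by
  induction l with
  | nil => intro s; simp [everyOther]
  | cons d t ih =>
    intro s
    have hdd := digit_bounds (hd d (by simp))
    have iht := ih (fun c hc => hd c (by simp [hc]))
    have hstep2 : pvStepA (s, 2) d = (s + pvReduce (2 * pvDigit d), 1) := by
      simp only [pvStepA]
      rw [mul_comm (pvDigit d) 2, red_eq (pvDigit d) hdd.1 hdd.2]
      simp
    have hstep1 : pvStepA (s, 1) d = (s + pvDigit d, 2) := by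
      simp only [pvStepA]
      rw [if_neg (by omega), if_neg (by omega), mul_one]
    constructor
    · rw [List.foldl_cons, hstep2, (iht _).2, everyOther_cons]
      simp; ring
    · rw [List.foldl_cons, hstep1, (iht _).1, everyOther_cons]
      simp; ring

-- ===== VERDICT (by name: the statement is the Claim_ definition above) =====
theorem calc_mod10_rl_spec : Claim_equal_calc_mod10_rl := by
  intro code _ hpre
  unfold Spec_calc_mod10_rl
  simp only [calc_mod10_rl, calc_mod10_rl_alt]
  have hd : ∀ c ∈ code.toList.reverse, c.isDigit = true := by
    intro c hc
    rw [List.mem_reverse] at hc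
    exact List.all_eq_true.mp hpre c hc
  rw [(loop_eq code.toList.reverse hd 0).1]
  simp
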